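-- pv_equiv track=rewrite | github.com/PolicLL/Database-Algorithm | model.py | getAllPossibleCombinationsForPK
-- ===== SOURCE A (Python) =====
-- import itertools
--
-- def getAllPossibleCombinationsForPK(attributes):
--     allPossiblePKCombinations = []
--
--     MIN_PK_LENGTH = 1
--     MAX_PK_LENGTH = len(attributes)
--
--     for primaryKeyLength in range(MIN_PK_LENGTH, MAX_PK_LENGTH):
--         tempListPossiblePKs = itertools.combinations(attributes, primaryKeyLength)
--         allPossiblePKCombinations += tempListPossiblePKs
--
--     return allPossiblePKCombinations
-- ===== SOURCE B (Python) =====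
-- def getAllPossibleCombinationsForPK(attributes):
--     n = len(attributes)
--     result = []
--
--     def emit(items, chosen, need):
--         # explicit recursive combination generator over the remaining suffix
--         if need == 0:
--             result.append(chosen)
--             return
--         if not items:
--             return
--         emit(items[1:], chosen + (items[0],), need - 1)
--         emit(items[1:], chosen, need)
--
--     for k in range(1, n):
--         emit(tuple(attributes), (), k)
--     return result
-- ===== Notes on version B (the rewrite author's own statement) =====
-- stated objective: alternative
-- what changed: Replaces the itertools.combinations library call with an explicit pick-or-skip recursive generator over the attribute suffix that emits each chosen tuple in the same shallowest-first order.
import Mathlib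
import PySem

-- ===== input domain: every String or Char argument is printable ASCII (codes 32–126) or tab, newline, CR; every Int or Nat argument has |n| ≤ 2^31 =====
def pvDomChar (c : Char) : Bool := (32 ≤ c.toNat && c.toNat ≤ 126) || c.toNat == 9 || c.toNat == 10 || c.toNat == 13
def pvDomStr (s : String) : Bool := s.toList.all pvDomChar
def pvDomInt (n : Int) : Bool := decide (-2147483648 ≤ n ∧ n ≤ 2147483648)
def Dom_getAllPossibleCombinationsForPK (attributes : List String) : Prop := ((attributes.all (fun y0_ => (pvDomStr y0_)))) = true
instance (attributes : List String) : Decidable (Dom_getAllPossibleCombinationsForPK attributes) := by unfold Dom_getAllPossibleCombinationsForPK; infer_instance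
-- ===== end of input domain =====

-- B replaces itertools.combinations with an explicit pick-or-skip recursion emitting tuples in the same order (objective: alternative).

-- ===== PORT A =====
-- itertools.combinations(xs, k) in its documented lexicographic-by-index order
def pvCombA : Nat → List String → List (List String)
  | 0, _ => [[]]
  | _+1, [] => []
  | k+1, x::xs => (pvCombA k xs).map (x :: ·) ++ pvCombA (k+1) xs

def getAllPossibleCombinationsForPK (attributes : List String) : List (List String) :=
  (PySem.List.pyRange 1 attributes.length 1).foldl
    (fun acc k => acc ++ pvCombA k.toNat attributes) []

-- ===== PORT B =====
-- emit(items, chosen, need): pick items[0] (extending chosen), then skip it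
def pvEmit : List String → List String → Nat → List (List String)
  | _, chosen, 0 => [chosen]
  | [], _, _+1 => []
  | x::xs, chosen, k+1 => pvEmit xs (chosen ++ [x]) k ++ pvEmit xs chosen (k+1)

def getAllPossibleCombinationsForPK_alt (attributes : List String) : List (List String) :=
  (PySem.List.pyRange 1 attributes.length 1).flatMap
    (fun k => pvEmit attributes [] k.toNat)

-- ===== PRECONDITION & SPEC =====
def Spec_getAllPossibleCombinationsForPK (attributes : List String) (out : List (List String)) : Prop := out = getAllPossibleCombinationsForPK_alt attributes
instance (attributes : List String) (out : List (List String)) : Decidable (Spec_getAllPossibleCombinationsForPK attributes out) := by unfold Spec_getAllPossibleCombinationsForPK; infer_instance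

-- ===== CLAIM (what is proved, stated in full; the proofs are below) =====
def Claim_equal_getAllPossibleCombinationsForPK : Prop := ∀ (attributes : List String), Dom_getAllPossibleCombinationsForPK attributes → Spec_getAllPossibleCombinationsForPK attributes (getAllPossibleCombinationsForPK attributes)

-- ===== LEMMAS AND PROOFS =====
theorem pvEmit_eq_map (xs : List String) :
    ∀ (k : Nat) (chosen : List String),
      pvEmit xs chosen k = (pvCombA k xs).map (chosen ++ ·) := by
  induction xs with
  | nil =>
    intro k chosen
    cases k with
    | zero => simp [pvEmit, pvCombA]
    | succ k => simp [pvEmit, pvCombA]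
  | cons x xs ih =>
    intro k chosen
    cases k with
    | zero => simp [pvEmit, pvCombA]
    | succ k =>
      simp [pvEmit, pvCombA, ih, List.map_map, Function.comp]

-- ===== VERDICT (by name: the statement is the Claim_ definition above) =====
theorem getAllPossibleCombinationsForPK_spec : Claim_equal_getAllPossibleCombinationsForPK := by
  intro attributes _
  unfold Spec_getAllPossibleCombinationsForPK getAllPossibleCombinationsForPK
    getAllPossibleCombinationsForPK_alt
  rw [PySem.List.foldl_append_eq_flatMap]
  simp [pvEmit_eq_map]
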